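-- pv_equiv track=rewrite | github.com/kim-mg/algorithm | baekjoon/greedy/gas_station_13305.py | solution
-- ===== SOURCE A (Python) =====
-- def solution(n, d, c):
-- 	cost = 0
-- 	cur_city = c[0]
-- 	for i in range(n-1):
-- 		if cur_city > c[i]:
-- 			cur_city = c[i]
-- 		cost += d[i] * cur_city
-- 	return cost
-- ===== SOURCE B (Python) =====
-- def solution(n, d, c):
--     m = max(n - 1, 0)
--     # Pass 1: prefix sums of distances, D[j] = d[0] + ... + d[j-1].
--     D = [0]
--     acc = 0
--     for x in d[:m]:
--         acc += x
--         D.append(acc)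
--     # Pass 2: scan for positions where a strictly cheaper price appears; each
--     # reigning minimum price pays for its whole segment of road in one multiply.
--     total = 0
--     start = 0
--     price = c[0]
--     for j in range(1, m):
--         if c[j] < price:
--             total += price * (D[j] - D[start])
--             start = j
--             price = c[j]
--     return total + price * (D[m] - D[start])
-- ===== Notes on version B (the rewrite author's own statement) =====
-- stated objective: alternative
-- what changed: Replaces A's fused per-city loop (running minimum updated and d[i]*cur added every iteration) with a two-pass segment algorithm: first build a prefix-sum table D of the distances, then scan the prices for positions where a strictly cheaper price appears and charge each reigning minimum price once for its whole segment of road via price*(D[j]-D[start]).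
import Mathlib
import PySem

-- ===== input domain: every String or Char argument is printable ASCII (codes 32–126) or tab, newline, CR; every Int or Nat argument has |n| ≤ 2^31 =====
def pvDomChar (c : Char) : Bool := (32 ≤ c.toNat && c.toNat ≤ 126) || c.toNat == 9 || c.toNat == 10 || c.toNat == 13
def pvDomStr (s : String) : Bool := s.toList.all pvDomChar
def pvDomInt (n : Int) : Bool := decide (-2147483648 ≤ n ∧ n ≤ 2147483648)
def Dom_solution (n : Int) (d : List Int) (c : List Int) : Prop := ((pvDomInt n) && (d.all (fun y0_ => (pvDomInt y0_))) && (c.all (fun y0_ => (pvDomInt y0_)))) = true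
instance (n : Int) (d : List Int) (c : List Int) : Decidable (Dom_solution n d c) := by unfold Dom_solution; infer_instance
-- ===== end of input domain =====

-- B replaces A's fused per-city loop by two passes: a prefix-sum table of the
-- distances, then a segment scan that charges each reigning minimum price once
-- per segment (objective: alternative algorithm, same cost).

-- ===== PORT A =====
-- cost = 0; cur_city = c[0]; for i in range(n-1): if cur_city > c[i]: cur_city = c[i]; cost += d[i]*cur_city
def solution (n : Int) (d : List Int) (c : List Int) : Int :=
  ((PySem.List.pyRange 0 (n - 1) 1).foldl
    (fun (s : Int × Int) i =>
      let cur := if s.2 > PySem.List.pyGetD c i 0 then PySem.List.pyGetD c i 0 else s.2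
      (s.1 + PySem.List.pyGetD d i 0 * cur, cur))
    (0, PySem.List.pyGetD c 0 0)).1

-- ===== PORT B =====
-- m = max(n-1,0); D = [0]; acc = 0; for x in d[:m]: acc += x; D.append(acc)
-- total = 0; start = 0; price = c[0]
-- for j in range(1, m): if c[j] < price: total += price*(D[j]-D[start]); start = j; price = c[j]
-- return total + price*(D[m]-D[start])
def solution_alt (n : Int) (d : List Int) (c : List Int) : Int :=
  let m : Int := max (n - 1) 0
  let D : List Int := ((PySem.List.slice d none (some m)).foldl
      (fun (s : Int × List Int) x => (s.1 + x, s.2 ++ [s.1 + x])) (0, [0])).2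
  let st := (PySem.List.pyRange 1 m 1).foldl
      (fun (s : Int × Int × Int) j =>
        if PySem.List.pyGetD c j 0 < s.2.2 then
          (s.1 + s.2.2 * (PySem.List.pyGetD D j 0 - PySem.List.pyGetD D s.2.1 0),
           j, PySem.List.pyGetD c j 0)
        else s)
      (0, 0, PySem.List.pyGetD c 0 0)
  st.1 + st.2.2 * (PySem.List.pyGetD D m 0 - PySem.List.pyGetD D st.2.1 0)

-- ===== PRECONDITION & SPEC =====
-- Pre_ excludes exactly the inputs where A raises IndexError: empty c (c[0]),
-- or a loop bound n-1 exceeding len(d) or len(c) (d[i] / c[i] out of range).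
def Pre_solution (n : Int) (d : List Int) (c : List Int) : Prop :=
  c ≠ [] ∧ n - 1 ≤ (d.length : Int) ∧ n - 1 ≤ (c.length : Int)
instance (n : Int) (d : List Int) (c : List Int) : Decidable (Pre_solution n d c) := by
  unfold Pre_solution; infer_instance
def pvWitness_solution : Int × List Int × List Int := (4, [2, 3, 1], [5, 2, 4, 1])

def Spec_solution (n : Int) (d : List Int) (c : List Int) (out : Int) : Prop := out = solution_alt n d c
instance (n : Int) (d : List Int) (c : List Int) (out : Int) : Decidable (Spec_solution n d c out) := by unfold Spec_solution; infer_instance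

-- ===== CLAIM (what is proved, stated in full; the proofs are below) =====
def Claim_equal_solution : Prop := ∀ (n : Int) (d : List Int) (c : List Int), Dom_solution n d c → Pre_solution n d c → Spec_solution n d c (solution n d c)

-- ===== LEMMAS AND PROOFS =====

-- prefix minimum of the prices: pvPmin c k = min(c[0], …, c[k])
def pvPmin (c : List Int) : Nat → Int
  | 0 => c.getD 0 0
  | k + 1 => min (pvPmin c k) (c.getD (k + 1) 0)

-- prefix sum of the distances: pvP d k = d[0] + … + d[k-1]
def pvP (d : List Int) : Nat → Int
  | 0 => 0
  | k + 1 => pvP d k + d.getD k 0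

-- the common reference value: pvS d c k = Σ_{i<k} d[i] * pvPmin c i
def pvS (d c : List Int) : Nat → Int
  | 0 => 0
  | k + 1 => pvS d c k + d.getD k 0 * pvPmin c k

lemma pvPmin_step (c : List Int) (t : Nat) :
    min (pvPmin c (t - 1)) (c.getD t 0) = pvPmin c t := by
  cases t with
  | zero => simp [pvPmin]
  | succ k => simp [pvPmin]

-- A's fold over range(0, t) computes (pvS t, pvPmin (t-1))
lemma foldA_eq (d c : List Int) (t : Nat) :
    ((PySem.List.pyRange 0 (t : Int) 1).foldl
      (fun (s : Int × Int) i =>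
        let cur := if s.2 > PySem.List.pyGetD c i 0 then PySem.List.pyGetD c i 0 else s.2
        (s.1 + PySem.List.pyGetD d i 0 * cur, cur))
      (0, PySem.List.pyGetD c 0 0)) = (pvS d c t, pvPmin c (t - 1)) := by
  induction t with
  | zero =>
    simp [pvS, pvPmin, PySem.List.pyGetD_zero, List.getD]
  | succ k ih =>
    have h : (0 : Int) ≤ (k : Int) := by positivity
    have hcast : ((k + 1 : Nat) : Int) = (k : Int) + 1 := by push_cast; ring
    rw [hcast, PySem.List.pyRange_one_succ_right h, List.foldl_append, ih]
    simp only [List.foldl_cons, List.foldl_nil, PySem.List.pyGetD_natCast]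
    have hcur : (if pvPmin c (k - 1) > c.getD k 0 then c.getD k 0 else pvPmin c (k - 1))
        = pvPmin c k := by
      rw [← pvPmin_step c k]; split_ifs with h' <;> omega
    rw [hcur]
    simp [pvS]

-- the prefix-sum list built by B's first loop
def pvPsums (a : Int) : List Int → List Int
  | [] => []
  | x :: xs => (a + x) :: pvPsums (a + x) xs

lemma foldD_eq (l : List Int) (a : Int) (A : List Int) :
    (l.foldl (fun (s : Int × List Int) x => (s.1 + x, s.2 ++ [s.1 + x])) (a, A)) =
      (a + l.sum, A ++ pvPsums a l) := by
  induction l generalizing a A with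
  | nil => simp [pvPsums]
  | cons x xs ih => simp [pvPsums, ih, List.append_assoc]; ring

lemma pvPsums_getD (l : List Int) (a : Int) (k : Nat) (hk : k < l.length) :
    (pvPsums a l).getD k 0 = a + (l.take (k + 1)).sum := by
  induction l generalizing a k with
  | nil => simp at hk
  | cons x xs ih =>
    cases k with
    | zero => simp [pvPsums]
    | succ j =>
      simp only [pvPsums, List.getD_cons_succ, List.take_succ_cons, List.sum_cons]
      rw [ih (a + x) j (by simpa using hk)]
      ring

lemma pvP_eq_sum_take (d : List Int) (k : Nat) (hk : k ≤ d.length) :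
    pvP d k = (d.take k).sum := by
  induction k with
  | zero => simp [pvP]
  | succ j ih =>
    have hj : j < d.length := by omega
    rw [pvP, ih (by omega), List.getD_eq_getElem d 0 hj]
    exact (List.sum_take_succ d j hj).symm

-- B's D list indexes to the prefix sums pvP
lemma D_getD (d : List Int) (M : Nat) (hM : M ≤ d.length) (j : Nat) (hj : j ≤ M) :
    (([0] ++ pvPsums 0 (d.take M)).getD j 0) = pvP d j := by
  cases j with
  | zero => simp [pvP]
  | succ i =>
    have hlen : i < (d.take M).length := by simp; omega
    simp only [List.cons_append, List.nil_append, List.getD_cons_succ]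
    rw [pvPsums_getD _ _ _ hlen, List.take_take, pvP_eq_sum_take d (i + 1) (by omega)]
    simp [Nat.min_eq_left (by omega : i + 1 ≤ M)]

-- the segment identity: a constant prefix-minimum prices a whole block at once
lemma seg_sum (d c : List Int) (p : Int) (a b : Nat) (hab : a ≤ b)
    (hp : ∀ i, a ≤ i → i < b → pvPmin c i = p) :
    pvS d c b - pvS d c a = p * (pvP d b - pvP d a) := by
  induction b with
  | zero => interval_cases a; simp [pvS, pvP]
  | succ j ih =>
    by_cases haj : a = j + 1
    · subst haj; simp
    · have haj' : a ≤ j := by omega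
      have := ih haj' (fun i h1 h2 => hp i h1 (by omega))
      rw [pvS, pvP, hp j haj' (by omega)]
      linarith [this]

-- B's second loop: invariant over range(1, t)
lemma foldB_inv (d c : List Int) (D : List Int) (M : Nat)
    (hD : ∀ j, j ≤ M → D.getD j 0 = pvP d j)
    (t : Nat) (ht1 : 1 ≤ t) (htM : t ≤ M) :
    ∃ st : Nat, st < t ∧
      ((PySem.List.pyRange 1 (t : Int) 1).foldl
        (fun (s : Int × Int × Int) j =>
          if PySem.List.pyGetD c j 0 < s.2.2 then
            (s.1 + s.2.2 * (PySem.List.pyGetD D j 0 - PySem.List.pyGetD D s.2.1 0),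
             j, PySem.List.pyGetD c j 0)
          else s)
        (0, 0, PySem.List.pyGetD c 0 0)) = (pvS d c st, (st : Int), pvPmin c (t - 1)) ∧
      (∀ i, st ≤ i → i < t → pvPmin c i = pvPmin c (t - 1)) := by
  induction t with
  | zero => omega
  | succ k ih =>
    by_cases hk1 : k = 0
    · subst hk1
      refine ⟨0, by omega, ?_, ?_⟩
      · simp [pvS, pvPmin, PySem.List.pyGetD_zero, List.getD]
      · intro i h1 h2; interval_cases i; rfl
    · have hk : 1 ≤ k := by omega
      obtain ⟨st, hst, hfold, hconst⟩ := ih hk (by omega)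
      have h1k : (1 : Int) ≤ (k : Int) := by exact_mod_cast hk
      have hcast : ((k + 1 : Nat) : Int) = (k : Int) + 1 := by push_cast; ring
      rw [hcast, PySem.List.pyRange_one_succ_right h1k, List.foldl_append, hfold]
      simp only [List.foldl_cons, List.foldl_nil, PySem.List.pyGetD_natCast]
      by_cases hlt : c.getD k 0 < pvPmin c (k - 1)
      · have hpk : pvPmin c k = c.getD k 0 := by
          rw [← pvPmin_step c k]; omega
        have hseg : pvS d c k - pvS d c st = pvPmin c (k - 1) * (pvP d k - pvP d st) :=
          seg_sum d c _ st k (by omega) hconst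
        refine ⟨k, by omega, ?_, ?_⟩
        · rw [if_pos hlt, hD k (by omega), hD st (by omega)]
          have htot : pvS d c st + pvPmin c (k - 1) * (pvP d k - pvP d st) = pvS d c k := by
            linarith [hseg]
          simp only [Nat.add_sub_cancel, htot, hpk]
        · intro i h1 h2
          have : i = k := by omega
          subst this
          simp only [Nat.add_sub_cancel]
      · have hpk : pvPmin c k = pvPmin c (k - 1) := by
          rw [← pvPmin_step c k]; omega
        refine ⟨st, by omega, ?_, ?_⟩
        · rw [if_neg hlt]
          simp only [Nat.add_sub_cancel, hpk]
        · intro i h1 h2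
          simp only [Nat.add_sub_cancel, hpk]
          rcases Nat.lt_or_ge i k with h | h
          · exact hconst i h1 h
          · have : i = k := by omega
            subst this
            exact hpk

-- ===== VERDICT (by name: the statement is the Claim_ definition above) =====
theorem solution_spec : Claim_equal_solution := by
  intro n d c _ hpre
  obtain ⟨hc, hd, hcl⟩ := hpre
  unfold Spec_solution solution solution_alt
  obtain ⟨M, hM⟩ : ∃ M : Nat, (M : Int) = max (n - 1) 0 := ⟨(n - 1).toNat, by omega⟩
  have hMd : M ≤ d.length := by omega
  have hMc : M ≤ c.length := by omega
  have hc0 : 0 < c.length := List.length_pos_iff.mpr hc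
  -- A's side
  have hrange : PySem.List.pyRange 0 (n - 1) 1 = PySem.List.pyRange 0 (M : Int) 1 := by
    rw [PySem.List.pyRange_one, PySem.List.pyRange_one]
    congr 2
    omega
  rw [hrange, foldA_eq]
  -- B's D list
  have hslice : PySem.List.slice d none (some ((M : Nat) : Int)) = d.take M :=
    PySem.List.slice_to_natCast d M
  simp only [← hM, hslice, foldD_eq]
  have hDget : ∀ j, j ≤ M → ([0] ++ pvPsums 0 (d.take M)).getD j 0 = pvP d j :=
    fun j hj => D_getD d M hMd j hj
  rcases Nat.eq_zero_or_pos M with hM0 | hM1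
  · subst hM0
    simp [pvS, pvPsums, PySem.List.pyGetD_zero, List.getD]
  · obtain ⟨st, hst, hfold, hconst⟩ :=
      foldB_inv d c ([0] ++ pvPsums 0 (d.take M)) M hDget M hM1 (le_refl M)
    rw [hfold]
    simp only [PySem.List.pyGetD_natCast]
    rw [hDget M (le_refl M), hDget st (by omega)]
    have hseg : pvS d c M - pvS d c st = pvPmin c (M - 1) * (pvP d M - pvP d st) :=
      seg_sum d c _ st M (by omega) hconst
    linarith [hseg]
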